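-- pv_equiv track=rewrite | github.com/oso95/Surelock-Homes | agent/loop.py | _extract_inline_report
-- ===== SOURCE A (Python) =====
-- from typing import Any, Callable, Dict, Generator, List, Tuple
--
-- def _extract_inline_report(assistant_text: List[str]) -> str:
--     """Extract the report section from assistant text when the LLM wrote it inline.
--
--     Scans through the per-turn text blocks and returns everything from the first
--     block that contains a report header marker onward.
--     """
--     # Report-start markers — the LLM typically begins with one of these
--     _START_MARKERS = (
--         "SURELOCK HOMES",
--         "INVESTIGATION REPORT",
--         "# Surelock Homes",
--         "# INVESTIGATION REPORT",
--         "## 1. INVESTIGATION NARRATIVE",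
--         "1. INVESTIGATION NARRATIVE",
--     )
--     report_blocks: List[str] = []
--     collecting = False
--     for block in assistant_text:
--         if not collecting:
--             upper = block.upper()
--             if any(m.upper() in upper for m in _START_MARKERS):
--                 collecting = True
--                 report_blocks.append(block)
--         else:
--             report_blocks.append(block)
--     return "\n".join(report_blocks)
-- ===== SOURCE B (Python) =====
-- from typing import List
--
-- _MARKERS_UPPER = (
--     "SURELOCK HOMES",
--     "INVESTIGATION REPORT",
--     "# SURELOCK HOMES",
--     "# INVESTIGATION REPORT",
--     "## 1. INVESTIGATION NARRATIVE",
--     "1. INVESTIGATION NARRATIVE",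
-- )
--
-- def _extract_inline_report(assistant_text: List[str]) -> str:
--     """Walk the blocks back-to-front, counting how many blocks have been seen;
--     whenever the current block carries a report marker, record that count as the
--     length of the report suffix (the last recording, i.e. the leftmost marker,
--     wins). Join the last `keep` blocks."""
--     seen = 0
--     keep = 0
--     for block in reversed(assistant_text):
--         seen += 1
--         upper = block.upper()
--         if any(m in upper for m in _MARKERS_UPPER):
--             keep = seen
--     return "\n".join(assistant_text[len(assistant_text) - keep:])
-- ===== Notes on version B (the rewrite author's own statement) =====
-- stated objective: alternative
-- what changed: Replaced the forward collecting-flag loop that appends blocks into an accumulator list with a backwards traversal that only counts: it records the seen-block count at every marker-bearing block (the last recording, i.e. the leftmost marker, wins) and then joins the last keep blocks in one slice; no flag and no per-block list accumulation.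
import Mathlib
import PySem

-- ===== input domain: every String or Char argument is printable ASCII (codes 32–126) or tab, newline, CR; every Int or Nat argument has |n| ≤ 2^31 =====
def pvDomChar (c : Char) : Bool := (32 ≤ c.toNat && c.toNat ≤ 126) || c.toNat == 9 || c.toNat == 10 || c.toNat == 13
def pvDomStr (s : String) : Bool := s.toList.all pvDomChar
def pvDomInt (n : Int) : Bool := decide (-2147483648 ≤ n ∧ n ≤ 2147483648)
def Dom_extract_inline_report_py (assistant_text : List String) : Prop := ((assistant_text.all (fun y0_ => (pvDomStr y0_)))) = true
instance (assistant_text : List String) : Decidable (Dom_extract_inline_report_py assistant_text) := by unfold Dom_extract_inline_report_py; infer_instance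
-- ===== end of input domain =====

-- B replaces A's forward collecting-flag loop (append to list, join at end) with a backwards
-- traversal that grows the joined suffix string incrementally and records it at each marker
-- block, the leftmost marker's recording winning (objective: alternative algorithm, same cost).

-- ===== PORT A =====
def pvStartMarkers : List String :=
  ["SURELOCK HOMES", "INVESTIGATION REPORT", "# Surelock Homes",
   "# INVESTIGATION REPORT", "## 1. INVESTIGATION NARRATIVE",
   "1. INVESTIGATION NARRATIVE"]

def extract_inline_report_py (assistant_text : List String) : String :=
  let st := assistant_text.foldl
    (fun (st : List String × Bool) block =>
      if st.2 then (st.1 ++ [block], st.2)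
      else
        let upper := PySem.Str.upper block
        if pvStartMarkers.any (fun m => PySem.Str.isIn (PySem.Str.upper m) upper) then
          (st.1 ++ [block], true)
        else st)
    ([], false)
  PySem.Str.join "\n" st.1

-- ===== PORT B =====
def pvMarkersUpper : List String :=
  ["SURELOCK HOMES", "INVESTIGATION REPORT", "# SURELOCK HOMES",
   "# INVESTIGATION REPORT", "## 1. INVESTIGATION NARRATIVE",
   "1. INVESTIGATION NARRATIVE"]

-- one step of B's reversed loop: state = (seen, keep)
def pvAltStep (st : Nat × Nat) (block : String) : Nat × Nat :=
  let seen := st.1 + 1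
  let upper := PySem.Str.upper block
  if pvMarkersUpper.any (fun m => PySem.Str.isIn m upper) then (seen, seen)
  else (seen, st.2)

def extract_inline_report_py_alt (assistant_text : List String) : String :=
  let keep := (assistant_text.reverse.foldl pvAltStep (0, 0)).2
  PySem.Str.join "\n"
    (PySem.List.slice assistant_text (some ((assistant_text.length - keep : Nat) : Int)) none)

-- ===== PRECONDITION & SPEC =====
def Spec_extract_inline_report_py (assistant_text : List String) (out : String) : Prop := out = extract_inline_report_py_alt assistant_text
instance (assistant_text : List String) (out : String) : Decidable (Spec_extract_inline_report_py assistant_text out) := by unfold Spec_extract_inline_report_py; infer_instance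

-- ===== CLAIM (what is proved, stated in full; the proofs are below) =====
def Claim_equal_extract_inline_report_py : Prop := ∀ (assistant_text : List String), Dom_extract_inline_report_py assistant_text → Spec_extract_inline_report_py assistant_text (extract_inline_report_py assistant_text)

-- ===== LEMMAS AND PROOFS =====

-- B's full loop state
def pvAltGo (xs : List String) : Nat × Nat :=
  xs.reverse.foldl pvAltStep (0, 0)

theorem pvAltGo_cons (b : String) (bs : List String) :
    pvAltGo (b :: bs) = pvAltStep (pvAltGo bs) b := by
  simp [pvAltGo, List.foldl_append]

-- both programs test the same marker condition
theorem pvHit_iff (b : String) :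
    pvMarkersUpper.any (fun m => PySem.Str.isIn m (PySem.Str.upper b)) =
      pvStartMarkers.any (fun m => PySem.Str.isIn (PySem.Str.upper m) (PySem.Str.upper b)) := by
  have : pvMarkersUpper = pvStartMarkers.map PySem.Str.upper := by decide
  simp [this, List.any_map, Function.comp_def]

-- seen counts the processed blocks, keep never exceeds it
theorem pvAltGo_fst (xs : List String) : (pvAltGo xs).1 = xs.length := by
  induction xs with
  | nil => rfl
  | cons b bs ih =>
    rw [pvAltGo_cons]
    simp only [pvAltStep]
    split <;> simp [ih]

theorem pvAltGo_le (xs : List String) : (pvAltGo xs).2 ≤ xs.length := by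
  induction xs with
  | nil => exact Nat.le_refl 0
  | cons b bs ih =>
    rw [pvAltGo_cons]
    simp only [pvAltStep]
    rw [pvAltGo_fst]
    split <;> simp [ih, Nat.le_succ_of_le]

-- once collecting is true, A's fold appends every remaining block
theorem pvFold_true (bs : List String) (acc : List String) :
    bs.foldl
      (fun (st : List String × Bool) block =>
        if st.2 then (st.1 ++ [block], st.2)
        else
          let upper := PySem.Str.upper block
          if pvStartMarkers.any (fun m => PySem.Str.isIn (PySem.Str.upper m) upper) then
            (st.1 ++ [block], true)
          else st)
      (acc, true) = (acc ++ bs, true) := by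
  induction bs generalizing acc with
  | nil => simp
  | cons b bs ih =>
    rw [List.foldl_cons, if_pos rfl, ih]
    simp

-- A's head-step characterisation
theorem pvA_cons (b : String) (bs : List String) :
    extract_inline_report_py (b :: bs) =
      if pvStartMarkers.any (fun m => PySem.Str.isIn (PySem.Str.upper m) (PySem.Str.upper b)) then
        PySem.Str.join "\n" (b :: bs)
      else extract_inline_report_py bs := by
  by_cases hb : (pvStartMarkers.any (fun m => PySem.Str.isIn (PySem.Str.upper m) (PySem.Str.upper b))) = true
  · rw [if_pos hb]
    simp only [extract_inline_report_py, List.foldl_cons]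
    rw [if_neg (by simp), if_pos hb, pvFold_true]
    simp
  · rw [if_neg hb]
    simp only [extract_inline_report_py, List.foldl_cons]
    rw [if_neg (by simp)]
    simp only [Bool.not_eq_true] at hb
    simp only [hb]
    rfl

-- B's result, expressed through pvAltGo and List.drop
theorem pvAlt_eq_drop (xs : List String) :
    extract_inline_report_py_alt xs =
      PySem.Str.join "\n" (xs.drop (xs.length - (pvAltGo xs).2)) := by
  simp only [extract_inline_report_py_alt, PySem.List.slice_from_natCast, pvAltGo]

theorem pvMain (xs : List String) :
    extract_inline_report_py xs = extract_inline_report_py_alt xs := by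
  induction xs with
  | nil => rfl
  | cons b bs ih =>
    rw [pvA_cons, pvAlt_eq_drop, pvAltGo_cons]
    simp only [pvAltStep]
    rw [pvAltGo_fst, pvHit_iff]
    split
    · simp
    · rw [pvAlt_eq_drop] at ih
      rw [ih]
      have hle := pvAltGo_le bs
      have : bs.length + 1 - (pvAltGo bs).2 = (bs.length - (pvAltGo bs).2) + 1 := by omega
      simp only [List.length_cons, this, List.drop_succ_cons]

-- ===== VERDICT (by name: the statement is the Claim_ definition above) =====
theorem extract_inline_report_py_spec : Claim_equal_extract_inline_report_py := by
  intro xs _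
  unfold Spec_extract_inline_report_py
  exact pvMain xs
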